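-- pv_equiv track=rewrite | github.com/VirtualJoe760/jpsrealtor | scripts/check-subdivision-listings.py | get_price_range
-- ===== SOURCE A (Python) =====
-- from typing import Dict, List, Optional, Tuple
--
-- def get_price_range(listings: List[Dict]) -> str:
--     """Get price range for a set of listings"""
--     if not listings:
--         return 'N/A'
--
--     # Support both 'price' and 'listPrice' field names
--     prices = sorted([l.get('listPrice', 0) or l.get('price', 0) for l in listings if (l.get('listPrice', 0) or l.get('price', 0)) > 0])
--
--     if not prices:
--         return 'N/A'
--
--     min_price = format_price(prices[0])
--     max_price = format_price(prices[-1])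
--
--     return f"{min_price} - {max_price}"
--
-- def format_price(price: int) -> str:
--     """Format price as currency"""
--     return f"${price:,}"
-- ===== SOURCE B (Python) =====
-- def format_price(price: int) -> str:
--     """Format price as currency"""
--     return f"${price:,}"
--
-- def get_price_range(listings):
--     """Get price range for a set of listings: single fused pass keeping running min/max."""
--     lo = hi = None
--     for l in listings:
--         p = l.get('listPrice', 0) or l.get('price', 0)
--         if p > 0:
--             if lo is None:
--                 lo = hi = p
--             else:
--                 if p < lo:
--                     lo = p
--                 if p > hi:
--                     hi = p
--     if lo is None:
--         return 'N/A'
--     return f"{format_price(lo)} - {format_price(hi)}"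
-- ===== Notes on version B (the rewrite author's own statement) =====
-- stated objective: alternative
-- what changed: Replaces build-a-filtered-list-then-sort with a single fused pass over the listings that maintains running min/max (no intermediate list, no sort); asymptotically O(n) vs O(n log n) but not measurably faster at tested sizes.
import Mathlib
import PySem

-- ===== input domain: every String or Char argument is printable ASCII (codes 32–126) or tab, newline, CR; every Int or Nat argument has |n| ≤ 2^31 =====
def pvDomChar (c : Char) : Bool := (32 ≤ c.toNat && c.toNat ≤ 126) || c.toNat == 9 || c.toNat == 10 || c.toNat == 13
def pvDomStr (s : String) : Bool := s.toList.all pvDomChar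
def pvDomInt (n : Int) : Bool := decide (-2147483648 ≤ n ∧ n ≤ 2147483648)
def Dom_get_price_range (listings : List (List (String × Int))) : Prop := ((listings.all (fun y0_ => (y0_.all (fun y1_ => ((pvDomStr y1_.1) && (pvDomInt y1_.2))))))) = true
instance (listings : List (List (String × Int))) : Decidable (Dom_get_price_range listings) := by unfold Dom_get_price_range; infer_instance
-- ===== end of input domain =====

-- B is a single fused filter-and-extremes pass (running min/max, no intermediate list, no sort); return value only, no mutation.

-- ===== PORT A =====
-- l.get('listPrice', 0) or l.get('price', 0)   (shared by both Pythons, verbatim)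
def pvPrice (l : List (String × Int)) : Int :=
  let lp := PySem.Dict.getD (PySem.Dict.mk l) "listPrice" 0
  if lp ≠ 0 then lp else PySem.Dict.getD (PySem.Dict.mk l) "price" 0

-- comma-group a REVERSED digit list (the grouping step of f"{price:,}", exact for the positive ints it is applied to)
def pvGroup : List Char → List Char
  | a :: b :: c :: d :: rest => a :: b :: c :: ',' :: pvGroup (d :: rest)
  | l => l
termination_by l => l.length

-- format_price(price) = f"${price:,}", as a char list (shared helper of both Pythons)
def pvFmt (price : Int) : List Char :=
  '$' :: (pvGroup (PySem.Int.toChars price).reverse).reverse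

def get_price_range (listings : List (List (String × Int))) : String :=
  if listings = [] then "N/A"
  else
    let prices := PySem.List.sorted ((listings.filter (fun l => pvPrice l > 0)).map pvPrice) (fun x => x) false
    if prices = [] then "N/A"
    else
      let min_price := pvFmt (PySem.List.pyGetD prices 0 0)
      let max_price := pvFmt (PySem.List.pyGetD prices (-1) 0)
      String.ofList (min_price ++ ' ' :: '-' :: ' ' :: max_price)

-- ===== PORT B =====
-- loop body of B: fold one listing into the running (lo, hi) state
def pvStep (acc : Option (Int × Int)) (l : List (String × Int)) : Option (Int × Int) :=
  let p := pvPrice l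
  if p > 0 then
    match acc with
    | none => some (p, p)
    | some (lo, hi) => some (if p < lo then p else lo, if hi < p then p else hi)
  else acc

def get_price_range_alt (listings : List (List (String × Int))) : String :=
  match listings.foldl pvStep none with
  | none => "N/A"
  | some (lo, hi) => String.ofList (pvFmt lo ++ ' ' :: '-' :: ' ' :: pvFmt hi)

-- ===== PRECONDITION & SPEC =====
def Spec_get_price_range (listings : List (List (String × Int))) (out : String) : Prop := out = get_price_range_alt listings
instance (listings : List (List (String × Int))) (out : String) : Decidable (Spec_get_price_range listings out) := by unfold Spec_get_price_range; infer_instance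

-- ===== CLAIM (what is proved, stated in full; the proofs are below) =====
def Claim_equal_get_price_range : Prop := ∀ (listings : List (List (String × Int))), Dom_get_price_range listings → Spec_get_price_range listings (get_price_range listings)

-- ===== LEMMAS AND PROOFS =====

-- B's fold over the listings equals a min/max fold over the filtered-and-mapped price list
-- proof-side: the same state update, on an already-extracted price
def pvMM (acc : Option (Int × Int)) (p : Int) : Option (Int × Int) :=
  match acc with
  | none => some (p, p)
  | some (lo, hi) => some (if p < lo then p else lo, if hi < p then p else hi)

theorem pv_fold_eq (listings : List (List (String × Int))) (acc : Option (Int × Int)) :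
    listings.foldl pvStep acc
    = ((listings.filter (fun l => pvPrice l > 0)).map pvPrice).foldl pvMM acc := by
  induction listings generalizing acc with
  | nil => rfl
  | cons l t ih =>
    by_cases h : pvPrice l > 0 <;> simp [h, ih, pvStep, pvMM]

-- the running min/max fold computes foldl min / foldl max of the price list
theorem pv_minmax_fold (t : List Int) (lo hi : Int) :
    t.foldl pvMM (some (lo, hi)) = some (t.foldl min lo, t.foldl max hi) := by
  induction t generalizing lo hi with
  | nil => rfl
  | cons p t ih =>
    simp only [List.foldl_cons, pvMM]
    rw [ih]
    have h1 : (if p < lo then p else lo) = min lo p := by split_ifs <;> omega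
    have h2 : (if hi < p then p else hi) = max hi p := by split_ifs <;> omega
    rw [h1, h2]

-- prices[-1] for a nonempty list is its last element
theorem pv_pyGetD_neg_one (xs : List Int) (h : xs ≠ []) (d : Int) :
    PySem.List.pyGetD xs (-1) d = xs.getLast h := by
  simp [PySem.List.pyGetD, PySem.List.pyGet?, PySem.List.pyIdx?]
  have hl : 1 ≤ xs.length := List.length_pos_iff.mpr h
  rw [if_pos hl]
  simp [List.getLast?_eq_getElem?.symm, List.getLast?_eq_some_getLast h]

-- last element of a (·≤·)-pairwise list bounds every element
theorem pv_getLast_ge (s : List Int) (h : s ≠ []) (hp : s.Pairwise (· ≤ ·)) :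
    ∀ x ∈ s, x ≤ s.getLast h := by
  induction s with
  | nil => simp at h
  | cons a t ih =>
    intro x hx
    cases t with
    | nil =>
      simp only [List.mem_singleton] at hx
      simp [hx]
    | cons b u =>
      rcases List.mem_cons.mp hx with h1 | h1
      · subst h1
        have hle := (List.pairwise_cons.mp hp).1 ((b :: u).getLast (by simp)) (List.getLast_mem (by simp))
        simpa [List.getLast_cons] using hle
      · have := ih (by simp) (List.pairwise_cons.mp hp).2 x (by simpa using h1)
        simpa [List.getLast_cons] using this

-- ===== VERDICT (by name: the statement is the Claim_ definition above) =====
theorem get_price_range_spec : Claim_equal_get_price_range := by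
  intro listings _
  unfold Spec_get_price_range get_price_range get_price_range_alt
  simp only [pv_fold_eq]
  set ps := (listings.filter (fun l => pvPrice l > 0)).map pvPrice with hps
  cases hcase : ps with
  | nil =>
    by_cases hl : listings = [] <;> simp [hl, PySem.List.sorted]
  | cons p t =>
    have hne : listings ≠ [] := by
      intro he
      rw [he] at hps
      simp [hps] at hcase
    rw [if_neg hne]
    rw [List.foldl_cons]
    have hmm0 : pvMM none p = some (p, p) := rfl
    rw [hmm0, pv_minmax_fold t p p]
    -- A side: sorted (p :: t) is nonempty
    have hsne : PySem.List.sorted (p :: t) (fun x => x) false ≠ [] := by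
      intro he
      have := (PySem.List.sorted_perm (p :: t) (fun x : Int => x) false).length_eq
      rw [he] at this
      simp at this
    obtain ⟨m, s', hs⟩ := List.exists_cons_of_ne_nil hsne
    -- min/max of the price list as folds
    have hmin := List.min?_eq_some_iff.mp (rfl : (p :: t).min? = some (t.foldl min p))
    have hmax := List.max?_eq_some_iff.mp (rfl : (p :: t).max? = some (t.foldl max p))
    have hmem_sorted : ∀ x : Int, x ∈ PySem.List.sorted (p :: t) (fun x => x) false ↔ x ∈ p :: t := by
      intro x; exact PySem.List.mem_sorted (p :: t) (fun x : Int => x) false x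
    -- head of sorted = foldl min
    have hhead : m = t.foldl min p := by
      apply le_antisymm
      · exact PySem.List.key_head_sorted_le _ _ hs _ hmin.1
      · apply hmin.2
        rw [← hmem_sorted, hs]
        simp
    -- last of sorted = foldl max
    have hlast : (PySem.List.sorted (p :: t) (fun x => x) false).getLast hsne = t.foldl max p := by
      apply le_antisymm
      · apply hmax.2
        rw [← hmem_sorted]
        exact List.getLast_mem hsne
      · apply pv_getLast_ge _ hsne
        · exact PySem.List.sorted_pairwise (p :: t) (fun x => x)
        · rw [hmem_sorted]
          exact hmax.1
    have h0 : PySem.List.pyGetD (PySem.List.sorted (p :: t) (fun x => x) false) 0 0 = m := by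
      rw [hs]; simp [PySem.List.pyGetD, PySem.List.pyGet?, PySem.List.pyIdx?]
    have hneg : PySem.List.pyGetD (PySem.List.sorted (p :: t) (fun x => x) false) (-1) 0
        = t.foldl max p := by
      rw [pv_pyGetD_neg_one _ hsne, hlast]
    rw [if_neg hsne, h0, hneg, hhead]
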